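-- pv_equiv track=rewrite | github.com/ikaushikpal/DS-450-python | Binary Search/Maximum Number of Removable Characters.py | isValidK
-- ===== SOURCE A (Python) =====
-- def isValidK(s, p, removable, k):
--     map = {r:True for r in removable[:k]}
--
--     i, j = 0, 0
--     while i < len(s) and j<len(p):
--         if i not in map and s[i] == p[j]:
--             j += 1
--         i += 1
--
--     return j == len(p)
-- ===== SOURCE B (Python) =====
-- def isValidK(s, p, removable, k):
--     removed = set(removable[:k])
--     pos = {}
--     for i, c in enumerate(s):
--         if i not in removed:
--             pos.setdefault(c, []).append(i)
--     cur = -1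
--     for c in p:
--         lst = pos.get(c)
--         if lst is None:
--             return False
--         lo, hi = 0, len(lst)
--         while lo < hi:
--             mid = (lo + hi) // 2
--             if lst[mid] > cur:
--                 hi = mid
--             else:
--                 lo = mid + 1
--         if lo == len(lst):
--             return False
--         cur = lst[lo]
--     return True
-- ===== Notes on version B (the rewrite author's own statement) =====
-- stated objective: alternative
-- what changed: A does one fused two-pointer scan of s against p skipping removed indices; B instead builds a per-character index of kept positions and answers each pattern character by binary-searching that character's sorted position list for the smallest kept position after the current one.
import Mathlib
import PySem

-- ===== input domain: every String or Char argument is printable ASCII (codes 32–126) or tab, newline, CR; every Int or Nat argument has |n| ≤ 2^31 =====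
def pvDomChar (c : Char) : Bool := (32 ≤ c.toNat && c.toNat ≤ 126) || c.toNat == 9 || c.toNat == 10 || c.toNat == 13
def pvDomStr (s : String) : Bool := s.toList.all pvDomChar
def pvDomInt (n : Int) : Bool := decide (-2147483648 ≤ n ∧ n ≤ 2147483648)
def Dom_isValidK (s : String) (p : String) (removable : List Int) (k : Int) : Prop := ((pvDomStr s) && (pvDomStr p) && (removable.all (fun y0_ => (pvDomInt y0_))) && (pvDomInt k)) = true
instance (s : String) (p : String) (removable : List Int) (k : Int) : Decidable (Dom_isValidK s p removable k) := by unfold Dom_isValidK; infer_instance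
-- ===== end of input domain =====

-- B replaces A's fused skip-and-match two-pointer while loop by a different algorithm:
-- build a per-character index of kept positions, then for each pattern char binary-search
-- the smallest kept position after the current one (alternative algorithm, not claimed faster).


-- ===== PORT A =====
-- the while loop: recursion over the remaining chars of s, carrying the index i and pattern index j
def pvALoop (mp : PySem.Dict Int Bool) (pl : List Char) : List Char → Int → Nat → Nat
  | [], _, j => j
  | c :: rest, i, j =>
    if h : j < pl.length then
      if !(mp.contains i) && (c == pl[j]) then pvALoop mp pl rest (i + 1) (j + 1)
      else pvALoop mp pl rest (i + 1) j
    else j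

def isValidK (s : String) (p : String) (removable : List Int) (k : Int) : Bool :=
  let mp : PySem.Dict Int Bool :=
    (PySem.List.slice removable none (some k)).foldl (fun d r => d.insert r true) PySem.Dict.empty
  decide (pvALoop mp p.toList s.toList 0 0 = p.toList.length)

-- ===== PORT B =====
-- the 'while lo < hi' binary-search loop; lst[mid] is always in range (0 ≤ lo ≤ mid < hi ≤ len lst),
-- so the in-range read lst.getD mid 0 is exact
def pvBSearch (lst : List Int) (cur : Int) (lo hi : Nat) : Nat :=
  if h : lo < hi then
    let mid := (lo + hi) / 2
    if cur < lst.getD mid 0 then pvBSearch lst cur lo mid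
    else pvBSearch lst cur (mid + 1) hi
  else lo
termination_by hi - lo
decreasing_by all_goals omega

-- the 'for c in p' loop with its early returns, carrying cur
def pvBLoop (pos : PySem.Dict Char (List Int)) : List Char → Int → Bool
  | [], _ => true
  | c :: ps, cur =>
    match pos.get? c with
    | none => false
    | some lst =>
      let lo := pvBSearch lst cur 0 lst.length
      if lo = lst.length then false
      else pvBLoop pos ps (lst.getD lo 0)   -- lo < lst.length here, so getD is the exact lst[lo]

def isValidK_alt (s : String) (p : String) (removable : List Int) (k : Int) : Bool :=
  let removed : PySem.Set Int := PySem.Set.ofList (PySem.List.slice removable none (some k))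
  let pos : PySem.Dict Char (List Int) :=
    (PySem.List.enumerate s.toList 0).foldl
      (fun d pr => if !(removed.contains pr.1) then d.modify pr.2 [] (fun l => l ++ [pr.1]) else d)
      PySem.Dict.empty
  pvBLoop pos p.toList (-1)

-- ===== PRECONDITION & SPEC =====
def Spec_isValidK (s : String) (p : String) (removable : List Int) (k : Int) (out : Bool) : Prop := out = isValidK_alt s p removable k
instance (s : String) (p : String) (removable : List Int) (k : Int) (out : Bool) : Decidable (Spec_isValidK s p removable k out) := by unfold Spec_isValidK; infer_instance

-- ===== CLAIM (what is proved, stated in full; the proofs are below) =====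
def Claim_equal_isValidK : Prop := ∀ (s : String) (p : String) (removable : List Int) (k : Int), Dom_isValidK s p removable k → Spec_isValidK s p removable k (isValidK s p removable k)

-- ===== LEMMAS AND PROOFS =====

-- abstract subsequence check used as the meeting point of the two proofs:
-- pvFindDrop c ts = the suffix of ts after the first occurrence of c (none if absent)
def pvFindDrop (c : Char) : List Char → Option (List Char)
  | [] => none
  | b :: rest => if b == c then some rest else pvFindDrop c rest

def pvAllIn : List Char → List Char → Bool
  | [], _ => true
  | c :: ps, ts =>
    match pvFindDrop c ts with
    | none => false
    | some rest => pvAllIn ps rest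

-- the chars of cs (indexed from i) whose index is not removed, per a membership predicate
def pvFilt (mem : Int → Bool) : List Char → Int → List Char
  | [], _ => []
  | c :: rest, i => if mem i then pvFilt mem rest (i + 1) else c :: pvFilt mem rest (i + 1)

theorem pvAllIn_skip {a c : Char} (hne : (c == a) = false) (ps ts : List Char) :
    pvAllIn (a :: ps) (c :: ts) = pvAllIn (a :: ps) ts := by
  simp [pvAllIn, pvFindDrop, hne]

-- ===== A-side: A's fused loop equals the subsequence check on the kept chars =====
theorem pvALoop_eq (mp : PySem.Dict Int Bool) (pl : List Char) :
    ∀ (cs : List Char) (i : Int) (j : Nat), j ≤ pl.length →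
      decide (pvALoop mp pl cs i j = pl.length)
        = pvAllIn (pl.drop j) (pvFilt (fun x => mp.contains x) cs i) := by
  intro cs
  induction cs with
  | nil =>
    intro i j hj
    by_cases h : j = pl.length
    · subst h; simp [pvALoop, pvAllIn]
    · have hlt : j < pl.length := lt_of_le_of_ne hj h
      rw [List.drop_eq_getElem_cons hlt]
      simp [pvALoop, pvAllIn, pvFindDrop, pvFilt, h]
  | cons c rest ih =>
    intro i j hj
    by_cases h : j < pl.length
    · have hdrop := List.drop_eq_getElem_cons h
      simp only [pvALoop, dif_pos h, pvFilt]
      by_cases hm : mp.contains i = true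
      · simp only [hm, if_pos]
        simp only [Bool.not_true, Bool.false_and, if_neg (by simp : ¬ (false = true))]
        exact ih (i + 1) j hj
      · simp only [Bool.not_eq_true] at hm
        simp only [hm, Bool.not_false, Bool.true_and]
        by_cases hc : (c == pl[j]) = true
        · simp only [hc, if_pos]
          have heq : c = pl[j] := by simpa using hc
          rw [ih (i + 1) (j + 1) h, hdrop, ← heq]
          simp [pvAllIn, pvFindDrop]
        · simp only [Bool.not_eq_true] at hc
          simp only [hc, Bool.false_eq_true, if_neg, not_false_iff]
          rw [ih (i + 1) j hj, hdrop]
          exact (pvAllIn_skip hc _ _).symm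
    · have hj' : j = pl.length := le_antisymm hj (le_of_not_gt h)
      subst hj'
      simp [pvALoop, pvAllIn]

theorem pvContains_eq (sl : List Int) (i : Int) :
    (sl.foldl (fun d r => d.insert r true) (PySem.Dict.empty : PySem.Dict Int Bool)).contains i
      = PySem.Set.contains (PySem.Set.ofList sl) i := by
  rw [PySem.Dict.contains_eq_decide_mem_keys, PySem.Dict.keys_foldl_insert]
  have h1 : (PySem.Dict.empty : PySem.Dict Int Bool).keys = [] := rfl
  rw [h1, PySem.Set.update_nil_left]
  by_cases h : i ∈ PySem.Set.ofList sl
  · simp [h]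
  · simp only [h, decide_false]
    cases hc : PySem.Set.contains (PySem.Set.ofList sl) i
    · rfl
    · exact absurd ((PySem.Set.contains_iff _ _).1 hc) h

-- ===== B-side =====

-- kept chars = snd of the kept (index, char) pairs
theorem pvFilt_eq_map_filter_enum (mem : Int → Bool) :
    ∀ (cs : List Char) (i : Int),
      pvFilt mem cs i
        = (((PySem.List.enumerate cs i).filter (fun pr => !(mem pr.1))).map Prod.snd) := by
  intro cs
  induction cs with
  | nil => intro i; simp [PySem.List.enumerate_nil, pvFilt]
  | cons c rest ih =>
    intro i
    simp only [PySem.List.enumerate_cons, List.filter_cons, pvFilt]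
    by_cases h : mem i = true
    · simp [h, ih]
    · simp [h, ih]

-- indices in enumerate are ≥ start and strictly increasing
theorem pvEnum_lb : ∀ (cs : List Char) (i : Int) (pr : Int × Char),
    pr ∈ PySem.List.enumerate cs i → i ≤ pr.1 := by
  intro cs
  induction cs with
  | nil => intro i pr h; simp [PySem.List.enumerate_nil] at h
  | cons c rest ih =>
    intro i pr h
    rw [PySem.List.enumerate_cons] at h
    rcases List.mem_cons.1 h with h1 | h2
    · subst h1; simp
    · have := ih (i + 1) pr h2; omega

theorem pvEnum_chain : ∀ (cs : List Char) (i : Int),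
    (PySem.List.enumerate cs i).Pairwise (fun a b => a.1 < b.1) := by
  intro cs
  induction cs with
  | nil => intro i; simp [PySem.List.enumerate_nil]
  | cons c rest ih =>
    intro i
    rw [PySem.List.enumerate_cons]
    refine List.Pairwise.cons ?_ (ih (i + 1))
    intro pr h
    have := pvEnum_lb rest (i + 1) pr h
    simp; omega

-- characterisation of the position dictionary built by B's first loop
theorem pvPosGet (c : Char) :
    ∀ (kl : List (Int × Char)) (d : PySem.Dict Char (List Int)),
      (kl.foldl (fun d pr => d.modify pr.2 [] (fun l => l ++ [pr.1])) d).get? c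
        = match d.get? c with
          | none =>
            if ((kl.filter (fun pr => pr.2 == c)).map Prod.fst).isEmpty then none
            else some ((kl.filter (fun pr => pr.2 == c)).map Prod.fst)
          | some v => some (v ++ (kl.filter (fun pr => pr.2 == c)).map Prod.fst) := by
  intro kl
  induction kl with
  | nil =>
    intro d
    simp only [List.foldl_nil, List.filter_nil, List.map_nil]
    cases h : d.get? c <;> simp
  | cons pr rest ih =>
    intro d
    rw [List.foldl_cons, ih, List.filter_cons]
    by_cases hc : (pr.2 == c) = true
    · have hceq : pr.2 = c := eq_of_beq hc
      have hget : (d.modify pr.2 [] (fun l => l ++ [pr.1])).get? c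
          = some (d.getD pr.2 [] ++ [pr.1]) := by
        rw [hceq, PySem.Dict.modify, PySem.Dict.get?_insert_self]
      rw [hget, hc]
      cases h : d.get? c with
      | none =>
        have hd : d.getD pr.2 [] = [] := by rw [hceq, PySem.Dict.getD, h]; rfl
        simp [hd]
      | some v =>
        have hd : d.getD pr.2 [] = v := by rw [hceq, PySem.Dict.getD, h]; rfl
        simp [hd]
    · have hne : c ≠ pr.2 := fun e => hc (by rw [e]; exact beq_self_eq_true _)
      have hget : (d.modify pr.2 [] (fun l => l ++ [pr.1])).get? c = d.get? c := by
        rw [PySem.Dict.modify, PySem.Dict.get?_insert_of_ne _ _ hne]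
      have hcf : (pr.2 == c) = false := by simpa using hc
      rw [hget, hcf]
      cases d.get? c <;> rfl

-- first element of lst strictly above cur (linear reference version of the binary search)
def pvFirstGt (cur : Int) : List Int → Option Int
  | [] => none
  | x :: rest => if cur < x then some x else pvFirstGt cur rest

-- the first kept pair with char c and index > cur, as its index
def pvMinGt (c : Char) (cur : Int) : List (Int × Char) → Option Int
  | [] => none
  | pr :: rest => if pr.2 == c && decide (cur < pr.1) then some pr.1 else pvMinGt c cur rest

theorem pvMinGt_eq_firstGt (c : Char) (cur : Int) :
    ∀ (kl : List (Int × Char)),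
      pvMinGt c cur kl = pvFirstGt cur ((kl.filter (fun pr => pr.2 == c)).map Prod.fst) := by
  intro kl
  induction kl with
  | nil => simp [pvMinGt, pvFirstGt]
  | cons pr rest ih =>
    simp only [pvMinGt, List.filter_cons]
    by_cases hc : (pr.2 == c) = true
    · simp [hc, pvFirstGt, ih]
    · simp [hc, ih]

theorem pvMinGt_mem (c : Char) (cur : Int) :
    ∀ (kl : List (Int × Char)) (v : Int), pvMinGt c cur kl = some v → (v, c) ∈ kl := by
  intro kl
  induction kl with
  | nil => intro v h; simp [pvMinGt] at h
  | cons pr rest ih =>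
    intro v h
    simp only [pvMinGt] at h
    by_cases hc : (pr.2 == c && decide (cur < pr.1)) = true
    · rw [if_pos hc] at h
      have h2 : pr.2 = c := eq_of_beq (((Bool.and_eq_true _ _).mp hc).1)
      have h1 : pr.1 = v := by injection h
      have : pr = (v, c) := by cases pr; simp_all
      rw [← this]; exact List.mem_cons_self
    · rw [if_neg hc] at h
      exact List.mem_cons_of_mem _ (ih v h)

-- subsequence step on the filtered suffix, via pvMinGt
theorem pvFindDrop_filter (c : Char) :
    ∀ (kl : List (Int × Char)), kl.Pairwise (fun a b => a.1 < b.1) → ∀ (cur : Int),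
      pvFindDrop c ((kl.filter (fun pr => decide (cur < pr.1))).map Prod.snd)
        = match pvMinGt c cur kl with
          | none => none
          | some v => some ((kl.filter (fun pr => decide (v < pr.1))).map Prod.snd) := by
  intro kl
  induction kl with
  | nil => intro _ cur; simp [pvFindDrop, pvMinGt]
  | cons pr rest ih =>
    intro hpw cur
    have hrest : rest.Pairwise (fun a b => a.1 < b.1) := hpw.of_cons
    have hlt : ∀ q ∈ rest, pr.1 < q.1 := fun q hq => List.rel_of_pairwise_cons hpw hq
    simp only [List.filter_cons, pvMinGt]
    by_cases hcur : (decide (cur < pr.1)) = true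
    · rw [if_pos hcur]
      have hrest_all : rest.filter (fun q => decide (cur < q.1)) = rest :=
        List.filter_eq_self.2 (fun q hq => by have := hlt q hq; simp at hcur ⊢; omega)
      by_cases hc : (pr.2 == c) = true
      · have hcond : (pr.2 == c && decide (cur < pr.1)) = true := by simp [hc, hcur]
        rw [if_pos hcond, List.map_cons]
        have hfd : pvFindDrop c (pr.2 :: (rest.filter (fun q => decide (cur < q.1))).map Prod.snd)
            = some ((rest.filter (fun q => decide (cur < q.1))).map Prod.snd) := by
          simp [pvFindDrop, hc]
        have hrest_all2 : rest.filter (fun q => decide (pr.1 < q.1)) = rest :=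
          List.filter_eq_self.2 (fun q hq => by have := hlt q hq; simp; omega)
        rw [hfd, hrest_all]
        simp [hrest_all2]
      · have hcf : (pr.2 == c) = false := by simpa using hc
        rw [if_neg (by simp [hcf]), List.map_cons]
        have hskip : pvFindDrop c (pr.2 :: (rest.filter (fun q => decide (cur < q.1))).map Prod.snd)
            = pvFindDrop c ((rest.filter (fun q => decide (cur < q.1))).map Prod.snd) := by
          simp [pvFindDrop, hcf]
        rw [hskip, ih hrest cur]
        cases hmg : pvMinGt c cur rest with
        | none => rfl
        | some v =>
          have hv : (v, c) ∈ rest := pvMinGt_mem c cur rest v hmg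
          have hpr : (decide (v < pr.1)) = false := by
            have := hlt _ hv; simp at this ⊢; omega
          simp [hpr]
    · rw [if_neg hcur]
      rw [if_neg (by simp [Bool.and_eq_true]; intro _; simpa using hcur)]
      rw [ih hrest cur]
      cases hmg : pvMinGt c cur rest with
      | none => rfl
      | some v =>
        have hv : (v, c) ∈ rest := pvMinGt_mem c cur rest v hmg
        have hpr : (decide (v < pr.1)) = false := by
          have := hlt _ hv; simp at this ⊢; omega
        simp [hpr]

-- the binary search returns the count of elements ≤ cur, on a strictly increasing list
theorem pvBSearch_spec {cur : Int} (lst : List Int)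
    (hmono : ∀ m1 m2 : Nat, m1 ≤ m2 → m2 < lst.length → lst.getD m1 0 ≤ lst.getD m2 0) :
    ∀ (lo hi : Nat), lo ≤ hi → hi ≤ lst.length →
      (∀ m : Nat, m < lo → ¬ cur < lst.getD m 0) →
      (∀ m : Nat, hi ≤ m → m < lst.length → cur < lst.getD m 0) →
      (∀ m : Nat, m < pvBSearch lst cur lo hi → ¬ cur < lst.getD m 0) ∧
      (pvBSearch lst cur lo hi < lst.length → cur < lst.getD (pvBSearch lst cur lo hi) 0) ∧
      pvBSearch lst cur lo hi ≤ lst.length := by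
  intro lo hi
  induction lo, hi using pvBSearch.induct lst cur with
  | case1 lo hi h mid hmid ih =>
    intro hlh hhl hbelow habove
    rw [pvBSearch, dif_pos h, if_pos hmid]
    refine ih (by omega) (by omega) hbelow ?_
    intro m hm hml
    calc cur < lst.getD mid 0 := hmid
      _ ≤ lst.getD m 0 := hmono mid m (by omega) hml
  | case2 lo hi h mid hmid ih =>
    intro hlh hhl hbelow habove
    rw [pvBSearch, dif_pos h, if_neg hmid]
    refine ih (by omega) hhl ?_ habove
    intro m hm
    by_cases hml : m < lo
    · exact hbelow m hml
    · intro hcur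
      apply hmid
      calc cur < lst.getD m 0 := hcur
        _ ≤ lst.getD mid 0 := hmono m mid (by omega) (by omega)
  | case3 lo hi h =>
    intro hlh hhl hbelow habove
    rw [pvBSearch, dif_neg h]
    exact ⟨hbelow, fun hl => habove lo (by omega) hl, le_trans (by omega) hhl⟩

theorem pvFirstGt_eq (cur : Int) :
    ∀ (lst : List Int) (lo : Nat),
      (∀ m : Nat, m < lo → ¬ cur < lst.getD m 0) →
      (lo < lst.length → cur < lst.getD lo 0) →
      lo ≤ lst.length →
      pvFirstGt cur lst = if lo < lst.length then some (lst.getD lo 0) else none := by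
  intro lst
  induction lst with
  | nil =>
    intro lo _ _ hle
    simp [pvFirstGt]
  | cons x rest ih =>
    intro lo hbelow hat hle
    cases lo with
    | zero =>
      have : cur < x := by simpa using hat (by simp)
      simp [pvFirstGt, this]
    | succ lo' =>
      have hx : ¬ cur < x := by simpa using hbelow 0 (Nat.succ_pos _)
      simp only [pvFirstGt, if_neg hx]
      have := ih lo' (fun m hm => hbelow (m + 1) (by omega))
        (fun hl => by simpa using hat (by simpa using Nat.succ_lt_succ hl))
        (by simpa using Nat.le_of_succ_le_succ (by simpa using hle))
      rw [this]
      by_cases hl : lo' < rest.length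
      · rw [if_pos hl, if_pos (by simpa using Nat.succ_lt_succ hl)]
        simp
      · rw [if_neg hl, if_neg (by simp; omega)]

theorem pvBLoop_cons_some (pos : PySem.Dict Char (List Int)) (c : Char) (ps : List Char)
    (cur : Int) (lst : List Int) (h : pos.get? c = some lst) :
    pvBLoop pos (c :: ps) cur
      = if pvBSearch lst cur 0 lst.length = lst.length then false
        else pvBLoop pos ps (lst.getD (pvBSearch lst cur 0 lst.length) 0) := by
  simp only [pvBLoop, h]

theorem pvBLoop_cons_none (pos : PySem.Dict Char (List Int)) (c : Char) (ps : List Char)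
    (cur : Int) (h : pos.get? c = none) : pvBLoop pos (c :: ps) cur = false := by
  simp only [pvBLoop, h]

theorem pvAllIn_cons_none {c : Char} {ts : List Char} (ps : List Char)
    (h : pvFindDrop c ts = none) : pvAllIn (c :: ps) ts = false := by
  simp only [pvAllIn, h]

theorem pvAllIn_cons_some {c : Char} {ts rest : List Char} (ps : List Char)
    (h : pvFindDrop c ts = some rest) : pvAllIn (c :: ps) ts = pvAllIn ps rest := by
  simp only [pvAllIn, h]

theorem pvBLoop_eq (kl : List (Int × Char)) (hch : kl.Pairwise (fun a b => a.1 < b.1))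
    (pos : PySem.Dict Char (List Int))
    (hpos : ∀ c, pos.get? c
      = if ((kl.filter (fun pr => pr.2 == c)).map Prod.fst).isEmpty then none
        else some ((kl.filter (fun pr => pr.2 == c)).map Prod.fst)) :
    ∀ (ps : List Char) (cur : Int),
      pvBLoop pos ps cur = pvAllIn ps ((kl.filter (fun pr => decide (cur < pr.1))).map Prod.snd) := by
  intro ps
  induction ps with
  | nil => intro cur; rfl
  | cons c ps ih =>
    intro cur
    have hfdf := pvFindDrop_filter c kl hch cur
    have hmge := pvMinGt_eq_firstGt c cur kl
    by_cases hL : ((kl.filter (fun pr => pr.2 == c)).map Prod.fst).isEmpty = true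
    · have hLnil : (kl.filter (fun pr => pr.2 == c)).map Prod.fst = [] := List.isEmpty_iff.1 hL
      have hposc : pos.get? c = none := by rw [hpos c, if_pos hL]
      have hmg0 : pvMinGt c cur kl = none := by rw [hmge, hLnil]; rfl
      rw [pvBLoop_cons_none pos c ps cur hposc,
        pvAllIn_cons_none ps (by rw [hfdf, hmg0])]
    · have hposc : pos.get? c = some ((kl.filter (fun pr => pr.2 == c)).map Prod.fst) := by
        rw [hpos c, if_neg hL]
      rw [pvBLoop_cons_some pos c ps cur _ hposc]
      have hLpw : ((kl.filter (fun pr => pr.2 == c)).map Prod.fst).Pairwise (· < ·) := by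
        rw [List.pairwise_map]
        exact (hch.filter _)
      have hmono : ∀ m1 m2 : Nat, m1 ≤ m2 →
          m2 < ((kl.filter (fun pr => pr.2 == c)).map Prod.fst).length →
          ((kl.filter (fun pr => pr.2 == c)).map Prod.fst).getD m1 0
            ≤ ((kl.filter (fun pr => pr.2 == c)).map Prod.fst).getD m2 0 := by
        intro m1 m2 h12 h2
        have h1 : m1 < ((kl.filter (fun pr => pr.2 == c)).map Prod.fst).length := by omega
        rw [List.getD_eq_getElem _ _ h1, List.getD_eq_getElem _ _ h2]
        rcases Nat.lt_or_ge m1 m2 with hlt | hge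
        · exact le_of_lt (List.pairwise_iff_getElem.1 hLpw m1 m2 h1 h2 hlt)
        · have : m1 = m2 := by omega
          subst this; rfl
      obtain ⟨hbelow, hat, hle⟩ := pvBSearch_spec (cur := cur) _ hmono 0
        ((kl.filter (fun pr => pr.2 == c)).map Prod.fst).length (Nat.zero_le _) (le_refl _)
        (by intro m hm; omega) (by intro m hm hml; omega)
      have hfg := pvFirstGt_eq cur ((kl.filter (fun pr => pr.2 == c)).map Prod.fst)
        (pvBSearch ((kl.filter (fun pr => pr.2 == c)).map Prod.fst) cur 0
          ((kl.filter (fun pr => pr.2 == c)).map Prod.fst).length) hbelow hat hle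
      by_cases hlo : pvBSearch ((kl.filter (fun pr => pr.2 == c)).map Prod.fst) cur 0
          ((kl.filter (fun pr => pr.2 == c)).map Prod.fst).length
          = ((kl.filter (fun pr => pr.2 == c)).map Prod.fst).length
      · rw [if_pos hlo]
        have hfdn : pvFindDrop c ((kl.filter (fun pr => decide (cur < pr.1))).map Prod.snd)
            = none := by
          rw [hfdf, hmge, hfg, if_neg (by omega)]
        rw [pvAllIn_cons_none ps hfdn]
      · have hlt : pvBSearch ((kl.filter (fun pr => pr.2 == c)).map Prod.fst) cur 0
            ((kl.filter (fun pr => pr.2 == c)).map Prod.fst).length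
            < ((kl.filter (fun pr => pr.2 == c)).map Prod.fst).length := by omega
        rw [if_neg hlo]
        have hfds : pvFindDrop c ((kl.filter (fun pr => decide (cur < pr.1))).map Prod.snd)
            = some ((kl.filter (fun pr => decide
                (((kl.filter (fun pr => pr.2 == c)).map Prod.fst).getD
                  (pvBSearch ((kl.filter (fun pr => pr.2 == c)).map Prod.fst) cur 0
                    ((kl.filter (fun pr => pr.2 == c)).map Prod.fst).length) 0 < pr.1))).map
                Prod.snd) := by
          rw [hfdf, hmge, hfg, if_pos hlt]
        rw [pvAllIn_cons_some ps hfds]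
        exact ih _

-- ===== VERDICT (by name: the statement is the Claim_ definition above) =====
theorem isValidK_spec : Claim_equal_isValidK := by
  intro s p removable k _
  unfold Spec_isValidK
  simp only [isValidK, isValidK_alt]
  rw [pvALoop_eq _ _ _ _ _ (Nat.zero_le _), List.drop_zero]
  have hf : (fun x => (List.foldl (fun d r => d.insert r true) PySem.Dict.empty
      (PySem.List.slice removable none (some k))).contains x)
      = (fun x => PySem.Set.contains (PySem.Set.ofList (PySem.List.slice removable none (some k))) x) :=
    funext fun x => pvContains_eq _ x
  rw [hf]
  rw [pvFilt_eq_map_filter_enum]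
  simp only [PySem.List.foldl_if_eq_foldl_filter]
  have hch : ((PySem.List.enumerate s.toList 0).filter
      (fun pr : Int × Char => !(PySem.Set.contains (PySem.Set.ofList (PySem.List.slice removable none (some k))) pr.1))).Pairwise
      (fun a b => a.1 < b.1) := (pvEnum_chain s.toList 0).filter _
  have hpos : ∀ c, (((PySem.List.enumerate s.toList 0).filter
      (fun pr : Int × Char => !(PySem.Set.contains (PySem.Set.ofList (PySem.List.slice removable none (some k))) pr.1))).foldl
        (fun d pr => d.modify pr.2 [] (fun l => l ++ [pr.1])) PySem.Dict.empty).get? c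
      = if ((((PySem.List.enumerate s.toList 0).filter
            (fun pr : Int × Char => !(PySem.Set.contains (PySem.Set.ofList (PySem.List.slice removable none (some k))) pr.1))).filter
            (fun pr => pr.2 == c)).map Prod.fst).isEmpty then none
        else some ((((PySem.List.enumerate s.toList 0).filter
            (fun pr : Int × Char => !(PySem.Set.contains (PySem.Set.ofList (PySem.List.slice removable none (some k))) pr.1))).filter
            (fun pr => pr.2 == c)).map Prod.fst) := by
    intro c
    rw [pvPosGet]
    rfl
  rw [pvBLoop_eq _ hch _ hpos p.toList (-1)]
  have hall : ((PySem.List.enumerate s.toList 0).filter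
      (fun pr : Int × Char => !(PySem.Set.contains (PySem.Set.ofList (PySem.List.slice removable none (some k))) pr.1))).filter
      (fun pr => decide ((-1 : Int) < pr.1))
      = (PySem.List.enumerate s.toList 0).filter
        (fun pr : Int × Char => !(PySem.Set.contains (PySem.Set.ofList (PySem.List.slice removable none (some k))) pr.1)) :=
    List.filter_eq_self.2 (fun pr hpr => by
      have := pvEnum_lb s.toList 0 pr (List.mem_of_mem_filter hpr)
      simp at this ⊢; omega)
  rw [hall]
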